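-- pv_equiv track=rewrite | github.com/SammysStacks/Stress-Analysis-Head | _projectFiles/_supplementaryWork/Signal Data and Features/Helper Methods/signalPlotting.py | organizeSurveyAnswers_forCurves
-- ===== SOURCE A (Python) =====
-- def organizeSurveyAnswers_forCurves(surveyAnswers, experimentalOrder_byActivity):
--     activityGroups = ['CPT', 'Exercise', 'Music', 'VR']
--     segments = ["Recovery", "Activity", "Baseline"]
--
--     # xData = [[] for _ in range(len(activityGroups))]
--     yData = [[] for _ in range(len(activityGroups))]
--     # For each type of activity.
--     for experimentInd in range(len(experimentalOrder_byActivity)):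
--         experimentName = experimentalOrder_byActivity[experimentInd]
--         activityGroup, activityName = experimentName.split(" ")
--         surveyAnswer = surveyAnswers[experimentInd]
--
--         # Get the placement information
--         activityGroupInd = activityGroups.index(activityGroup)
--         segmentInd = segments.index(activityName)
--
--         # If a new experiment
--         if segmentInd == 2:
--             # xData[activityGroupInd].append([])
--             yData[activityGroupInd].append([])
--
--         # Store the final label
--         # xData[activityGroupInd][-1].append(surveyAnswer)
--         yData[activityGroupInd][-1].append(surveyAnswer)
--
--     return yData, activityGroups
-- ===== SOURCE B (Python) =====
-- def organizeSurveyAnswers_forCurves(surveyAnswers, experimentalOrder_byActivity):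
--     activityGroups = ['CPT', 'Exercise', 'Music', 'VR']
--     segments = ["Recovery", "Activity", "Baseline"]
--
--     # Phase 1: partition the (segment, answer) pairs into one bucket per activity group.
--     buckets = [[] for _ in activityGroups]
--     for experimentName, surveyAnswer in zip(experimentalOrder_byActivity, surveyAnswers):
--         activityGroup, activityName = experimentName.split(" ")
--         buckets[activityGroups.index(activityGroup)].append(
--             (segments.index(activityName), surveyAnswer))
--
--     # Phase 2: chunk each bucket, opening a fresh chunk at every Baseline segment.
--     yData = []
--     for bucket in buckets:
--         rows = []
--         current = None
--         for segmentInd, surveyAnswer in bucket: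
--             if segmentInd == 2:
--                 if current is not None:
--                     rows.append(current)
--                 current = []
--             current.append(surveyAnswer)
--         if current is not None:
--             rows.append(current)
--         yData.append(rows)
--     return yData, activityGroups
-- ===== Notes on version B (the rewrite author's own statement) =====
-- stated objective: alternative
-- what changed: A fills all four groups' nested lists in one interleaved index loop mutating yData[g][-1]; B first partitions the (segment, answer) pairs into one bucket per activity group, then chunks each bucket independently with an explicit current-chunk accumulator that closes at every Baseline marker.
import Mathlib
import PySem

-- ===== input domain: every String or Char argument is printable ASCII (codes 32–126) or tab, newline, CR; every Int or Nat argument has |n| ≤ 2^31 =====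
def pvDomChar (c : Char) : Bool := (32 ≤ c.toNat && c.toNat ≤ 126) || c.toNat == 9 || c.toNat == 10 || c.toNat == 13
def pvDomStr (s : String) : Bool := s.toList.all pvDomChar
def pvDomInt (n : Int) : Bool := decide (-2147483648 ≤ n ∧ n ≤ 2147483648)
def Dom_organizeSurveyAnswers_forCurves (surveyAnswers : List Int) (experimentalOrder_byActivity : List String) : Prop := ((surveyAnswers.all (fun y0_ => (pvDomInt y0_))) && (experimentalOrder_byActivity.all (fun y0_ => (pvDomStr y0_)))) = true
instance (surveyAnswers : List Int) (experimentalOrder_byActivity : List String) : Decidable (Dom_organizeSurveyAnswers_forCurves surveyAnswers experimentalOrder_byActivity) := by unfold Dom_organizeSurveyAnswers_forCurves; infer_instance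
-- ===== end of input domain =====

-- B re-implements the single interleaved index loop as two phases (partition the pairs into
-- per-group buckets, then chunk each bucket at its Baseline markers); equal return values on Pre_.

-- ===== PORT A =====
def pvGroups : List String := ["CPT", "Exercise", "Music", "VR"]
def pvSegments : List String := ["Recovery", "Activity", "Baseline"]

/-- `activityGroup, activityName = experimentName.split(" ")` plus the two `.index` calls,
    shared by both Pythons verbatim; `none` = Python raises (ValueError), excluded by `Pre_`. -/
def pvParse (name : String) : Option (Nat × Nat) :=
  match PySem.Str.split? name " " with
  | some [g, s] =>
    match PySem.List.index? pvGroups g, PySem.List.index? pvSegments s with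
    | some gi, some si => some (gi, si)
    | _, _ => none
  | _ => none

/-- `rows[-1].append(x)`; on `[]` Python raises IndexError (excluded by `Pre_`). -/
def pvAppendLast : List (List Int) → Int → List (List Int)
  | [], _ => []
  | [r], x => [r ++ [x]]
  | r :: s :: rs, x => r :: pvAppendLast (s :: rs) x

/-- One iteration of A's loop body. -/
def pvStepA (yData : List (List (List Int))) (name : String) (ans : Int) : List (List (List Int)) :=
  match pvParse name with
  | some (gi, si) =>
    let yData := if si = 2 then yData.set gi (yData.getD gi [] ++ [[]]) else yData
    yData.set gi (pvAppendLast (yData.getD gi []) ans)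
  | none => yData

def organizeSurveyAnswers_forCurves (surveyAnswers : List Int) (experimentalOrder_byActivity : List String) : List (List (List Int)) × List String :=
  let yData := (PySem.List.pyRange 0 (PySem.List.len experimentalOrder_byActivity)).foldl
    (fun y i => pvStepA y (PySem.List.pyGetD experimentalOrder_byActivity i "")
                          (PySem.List.pyGetD surveyAnswers i 0))
    [[], [], [], []]
  (yData, pvGroups)

-- ===== PORT B =====
/-- Phase 1 step: drop the parsed `(segmentInd, answer)` pair into its group's bucket. -/
def pvStepBucket (b : List (List (Nat × Int))) (name : String) (ans : Int) : List (List (Nat × Int)) :=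
  match pvParse name with
  | some (gi, si) => b.set gi (b.getD gi [] ++ [(si, ans)])
  | none => b

/-- Phase 2 step: a Baseline pair closes the current chunk and opens `[answer]`;
    other pairs extend the current chunk (`none` = Python's `current is None` crash, excluded). -/
def pvChunkStep (acc : List (List Int) × Option (List Int)) (p : Nat × Int) : List (List Int) × Option (List Int) :=
  if p.1 = 2 then
    ((match acc.2 with | some c => acc.1 ++ [c] | none => acc.1), some [p.2])
  else
    (acc.1, acc.2.map (· ++ [p.2]))

/-- Phase 2: chunk one bucket at its Baseline markers. -/
def pvRows (bucket : List (Nat × Int)) : List (List Int) :=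
  let acc := bucket.foldl pvChunkStep ([], none)
  match acc.2 with | some c => acc.1 ++ [c] | none => acc.1

def organizeSurveyAnswers_forCurves_alt (surveyAnswers : List Int) (experimentalOrder_byActivity : List String) : List (List (List Int)) × List String :=
  let buckets := (experimentalOrder_byActivity.zip surveyAnswers).foldl
    (fun b p => pvStepBucket b p.1 p.2) [[], [], [], []]
  (buckets.map pvRows, pvGroups)

-- ===== PRECONDITION & SPEC =====
-- Pre_ = exactly the inputs where Python A returns: enough answers, every experiment name parses
-- (one space, known group, known segment), and each non-Baseline pair is preceded by a Baseline
-- of its own group (else Python raises IndexError on `yData[g][-1]`).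
def Pre_organizeSurveyAnswers_forCurves (surveyAnswers : List Int) (experimentalOrder_byActivity : List String) : Prop :=
  experimentalOrder_byActivity.length ≤ surveyAnswers.length ∧
  ((List.range experimentalOrder_byActivity.length).all (fun i =>
    match pvParse (experimentalOrder_byActivity.getD i "") with
    | some (gi, si) => si == 2 || (List.range i).any
        (fun j => pvParse (experimentalOrder_byActivity.getD j "") == some (gi, 2))
    | none => false)) = true
instance (surveyAnswers : List Int) (experimentalOrder_byActivity : List String) : Decidable (Pre_organizeSurveyAnswers_forCurves surveyAnswers experimentalOrder_byActivity) := by unfold Pre_organizeSurveyAnswers_forCurves; infer_instance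

def pvWitness_organizeSurveyAnswers_forCurves : List Int × List String :=
  ([5, 6, 7, 2], ["CPT Baseline", "CPT Activity", "Music Baseline", "CPT Recovery"])

def Spec_organizeSurveyAnswers_forCurves (surveyAnswers : List Int) (experimentalOrder_byActivity : List String) (out : List (List (List Int)) × List String) : Prop := out = organizeSurveyAnswers_forCurves_alt surveyAnswers experimentalOrder_byActivity
instance (surveyAnswers : List Int) (experimentalOrder_byActivity : List String) (out : List (List (List Int)) × List String) : Decidable (Spec_organizeSurveyAnswers_forCurves surveyAnswers experimentalOrder_byActivity out) := by unfold Spec_organizeSurveyAnswers_forCurves; infer_instance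

-- ===== CLAIM (what is proved, stated in full; the proofs are below) =====
def Claim_equal_organizeSurveyAnswers_forCurves : Prop := ∀ (surveyAnswers : List Int) (experimentalOrder_byActivity : List String), Dom_organizeSurveyAnswers_forCurves surveyAnswers experimentalOrder_byActivity → Pre_organizeSurveyAnswers_forCurves surveyAnswers experimentalOrder_byActivity → Spec_organizeSurveyAnswers_forCurves surveyAnswers experimentalOrder_byActivity (organizeSurveyAnswers_forCurves surveyAnswers experimentalOrder_byActivity)

-- ===== LEMMAS AND PROOFS =====

/-- A parsed group index is an index into the four groups. -/
lemma pvParse_fst_lt {name : String} {gi si : Nat} (h : pvParse name = some (gi, si)) :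
    gi < 4 := by
  unfold pvParse at h
  rcases hs : PySem.Str.split? name " " with _ | ⟨_ | ⟨g, _ | ⟨s, _ | _⟩⟩⟩ <;> simp [hs] at h
  rcases hg : List.idxOf? g pvGroups with _ | gi' <;>
    rcases hseg : List.idxOf? s pvSegments with _ | si' <;>
      rw [hg, hseg] at h <;> simp at h
  obtain ⟨hk, -, -⟩ := PySem.List.getElem_of_index?_eq_some
    (show PySem.List.index? pvGroups g = some gi' by
      rw [PySem.List.index?_eq_idxOf?]; exact hg)
  have h4 : pvGroups.length = 4 := rfl
  omega

/-- `rows[-1].append` after an explicit last element. -/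
lemma pvAppendLast_append (l : List (List Int)) (c : List Int) (x : Int) :
    pvAppendLast (l ++ [c]) x = l ++ [c ++ [x]] := by
  induction l with
  | nil => simp [pvAppendLast]
  | cons a l ih => cases l <;> simp_all [pvAppendLast]

/-- Index loop over two `getD`-indexed lists is a fold over their zip. -/
lemma pvFoldl_range_getD {α β γ : Type} (f : γ → α → β → γ) (da : α) (db : β) :
    ∀ (xs : List α) (ys : List β) (acc : γ), xs.length ≤ ys.length →
    (List.range xs.length).foldl (fun c i => f c (xs.getD i da) (ys.getD i db)) acc
      = (xs.zip ys).foldl (fun c p => f c p.1 p.2) acc := by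
  intro xs
  induction xs with
  | nil => simp
  | cons x xs ih =>
    intro ys acc hlen
    cases ys with
    | nil => simp at hlen
    | cons y ys =>
      simp only [List.length_cons, List.range_succ_eq_map, List.foldl_cons, List.foldl_map,
        List.getD_cons_zero, List.getD_cons_succ, List.zip_cons_cons]
      exact ih ys _ (by simpa using hlen)

/-- A's fold preserves the length of `yData`. -/
lemma pvFoldA_length (ps : List (String × Int)) :
    ∀ y, (ps.foldl (fun y p => pvStepA y p.1 p.2) y).length = y.length := by
  induction ps with
  | nil => simp
  | cons p ps ih =>
    intro y
    rw [List.foldl_cons, ih]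
    unfold pvStepA
    rcases pvParse p.1 with _ | ⟨gi, si⟩ <;> simp
    split <;> simp

/-- B's bucket fold preserves the length of `buckets`. -/
lemma pvFoldBk_length (ps : List (String × Int)) :
    ∀ b, (ps.foldl (fun b p => pvStepBucket b p.1 p.2) b).length = b.length := by
  induction ps with
  | nil => simp
  | cons p ps ih =>
    intro b
    rw [List.foldl_cons, ih]
    unfold pvStepBucket
    rcases pvParse p.1 with _ | ⟨gi, si⟩ <;> simp

/-- The pairs of group `g`, in order. -/
def pvFilt (g : Nat) (ps : List (String × Int)) : List (Nat × Int) :=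
  ps.filterMap (fun p =>
    match pvParse p.1 with
    | some (gi, si) => if gi = g then some (si, p.2) else none
    | none => none)

/-- A's per-iteration action on the single group it touches. -/
def pvStepG (rows : List (List Int)) (q : Nat × Int) : List (List Int) :=
  pvAppendLast (if q.1 = 2 then rows ++ [[]] else rows) q.2

/-- Per-group factorisation of A's interleaved fold. -/
lemma pvFoldA_getD (ps : List (String × Int)) :
    ∀ (y : List (List (List Int))) (g : Nat), y.length = 4 → g < 4 →
    (ps.foldl (fun y p => pvStepA y p.1 p.2) y).getD g []
      = (pvFilt g ps).foldl pvStepG (y.getD g []) := by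
  induction ps with
  | nil => intro y g _ _; simp [pvFilt]
  | cons p ps ih =>
    intro y g hy hg
    rcases hp : pvParse p.1 with _ | ⟨gi, si⟩
    · rw [List.foldl_cons]
      show ((ps.foldl _ (pvStepA y p.1 p.2))).getD g [] = _
      rw [show pvStepA y p.1 p.2 = y by unfold pvStepA; rw [hp]]
      rw [ih y g hy hg]
      simp only [pvFilt, List.filterMap_cons, hp]
    · have hgi : gi < 4 := pvParse_fst_lt hp
      have hstep : pvStepA y p.1 p.2 = y.set gi (pvStepG (y.getD gi []) (si, p.2)) := by
        unfold pvStepA pvStepG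
        rw [hp]
        by_cases h2 : si = 2 <;>
          simp [h2, List.getD_eq_getElem?_getD, List.set_set, hgi, hy]
      rw [List.foldl_cons]
      show ((ps.foldl _ (pvStepA y p.1 p.2))).getD g [] = _
      rw [hstep, ih _ g (by simp [hy]) hg]
      by_cases hgg : gi = g
      · subst hgg
        have : (y.set gi (pvStepG (y.getD gi []) (si, p.2))).getD gi []
            = pvStepG (y.getD gi []) (si, p.2) := by
          simp [List.getD_eq_getElem?_getD, hgi, hy]
        rw [this]
        simp [pvFilt, hp]
      · have : (y.set gi (pvStepG (y.getD gi []) (si, p.2))).getD g []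
            = y.getD g [] := by
          simp [List.getD_eq_getElem?_getD, List.getElem?_set_ne hgg]
        rw [this]
        simp [pvFilt, hp, hgg]

/-- Per-group factorisation of B's bucket fold. -/
lemma pvFoldBk_getD (ps : List (String × Int)) :
    ∀ (b : List (List (Nat × Int))) (g : Nat), b.length = 4 → g < 4 →
    (ps.foldl (fun b p => pvStepBucket b p.1 p.2) b).getD g []
      = b.getD g [] ++ pvFilt g ps := by
  induction ps with
  | nil => intro b g _ _; simp [pvFilt]
  | cons p ps ih =>
    intro b g hb hg
    rcases hp : pvParse p.1 with _ | ⟨gi, si⟩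
    · rw [List.foldl_cons]
      show ((ps.foldl _ (pvStepBucket b p.1 p.2))).getD g [] = _
      rw [show pvStepBucket b p.1 p.2 = b by unfold pvStepBucket; rw [hp]]
      rw [ih b g hb hg]
      simp only [pvFilt, List.filterMap_cons, hp]
    · have hgi : gi < 4 := pvParse_fst_lt hp
      have hstep : pvStepBucket b p.1 p.2 = b.set gi (b.getD gi [] ++ [(si, p.2)]) := by
        unfold pvStepBucket; rw [hp]
      rw [List.foldl_cons]
      show ((ps.foldl _ (pvStepBucket b p.1 p.2))).getD g [] = _
      rw [hstep, ih _ g (by simp [hb]) hg]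
      by_cases hgg : gi = g
      · subst hgg
        have : (b.set gi (b.getD gi [] ++ [(si, p.2)])).getD gi []
            = b.getD gi [] ++ [(si, p.2)] := by
          simp [List.getD_eq_getElem?_getD, hgi, hb]
        rw [this]
        simp [pvFilt, hp]
      · have : (b.set gi (b.getD gi [] ++ [(si, p.2)])).getD g [] = b.getD g [] := by
          simp [List.getD_eq_getElem?_getD, List.getElem?_set_ne hgg]
        rw [this]
        simp [pvFilt, hp, hgg]

/-- Flatten a chunking state back to A's representation. -/
def pvToA (st : List (List Int) × Option (List Int)) : List (List Int) :=
  st.1 ++ (match st.2 with | some c => [c] | none => [])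

/-- A's last-element manipulation simulates B's chunk accumulator. -/
lemma pvFoldG_eq_chunk (bs : List (Nat × Int)) :
    ∀ st : List (List Int) × Option (List Int), (st.2 = none → st.1 = []) →
    bs.foldl pvStepG (pvToA st) = pvToA (bs.foldl pvChunkStep st) := by
  induction bs with
  | nil => intro st _; rfl
  | cons q bs ih =>
    intro st hst
    have hinv : ((pvChunkStep st q).2 = none → (pvChunkStep st q).1 = []) := by
      unfold pvChunkStep
      rcases st with ⟨rows, _ | c⟩ <;> by_cases h2 : q.1 = 2 <;> simp_all
    have hone : pvStepG (pvToA st) q = pvToA (pvChunkStep st q) := by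
      rcases st with ⟨rows, _ | c⟩ <;> by_cases h2 : q.1 = 2
      · have : rows = [] := hst rfl
        subst this
        simp [pvStepG, pvChunkStep, pvToA, h2, pvAppendLast]
      · have : rows = [] := hst rfl
        subst this
        simp [pvStepG, pvChunkStep, pvToA, h2, pvAppendLast]
      · simp only [pvStepG, pvChunkStep, pvToA, h2, if_pos]
        rw [show rows ++ [c] ++ [[]] = (rows ++ [c]) ++ [([] : List Int)] from by simp]
        rw [pvAppendLast_append]
        simp
      · simp only [pvStepG, pvChunkStep, pvToA, if_neg h2, Option.map_some]
        rw [pvAppendLast_append]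
    rw [List.foldl_cons, List.foldl_cons, hone, ih _ hinv]

/-- B's chunking of a bucket equals A's per-group fold over the same pairs. -/
lemma pvRows_eq_foldG (bs : List (Nat × Int)) : pvRows bs = bs.foldl pvStepG [] := by
  have h := pvFoldG_eq_chunk bs ([], none) (fun _ => rfl)
  unfold pvRows
  rcases hacc : (bs.foldl pvChunkStep ([], none)).2 with _ | c <;>
    simp only [pvToA, hacc] at h <;> (simp only [hacc]; simpa using h.symm)

-- ===== VERDICT (by name: the statement is the Claim_ definition above) =====
theorem organizeSurveyAnswers_forCurves_spec : Claim_equal_organizeSurveyAnswers_forCurves := by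
  intro sa order _ hpre
  unfold Spec_organizeSurveyAnswers_forCurves
  unfold organizeSurveyAnswers_forCurves organizeSurveyAnswers_forCurves_alt
  obtain ⟨hlen, -⟩ := hpre
  simp only [PySem.List.len_eq, PySem.List.pyRange_zero_natCast, List.foldl_map,
    PySem.List.pyGetD_natCast]
  rw [pvFoldl_range_getD (fun y n a => pvStepA y n a) "" 0 order sa _ hlen]
  refine Prod.ext ?_ rfl
  dsimp only
  set ps := order.zip sa with hps
  have hlA : (ps.foldl (fun y p => pvStepA y p.1 p.2) [[], [], [], []]).length = 4 :=
    pvFoldA_length ps _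
  have hlB : (ps.foldl (fun b p => pvStepBucket b p.1 p.2) [[], [], [], []]).length = 4 :=
    pvFoldBk_length ps _
  apply List.ext_getElem (by rw [hlA, List.length_map, hlB])
  intro g hg1 hg2
  have hg4 : g < 4 := by rw [hlA] at hg1; exact hg1
  have hA : (ps.foldl (fun y p => pvStepA y p.1 p.2) [[], [], [], []])[g]
      = (pvFilt g ps).foldl pvStepG [] := by
    rw [← List.getD_eq_getElem _ []]
    rw [pvFoldA_getD ps _ g rfl hg4]
    interval_cases g <;> rfl
  have hB : (ps.foldl (fun b p => pvStepBucket b p.1 p.2) [[], [], [], []]).getD g []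
      = pvFilt g ps := by
    rw [pvFoldBk_getD ps _ g rfl hg4]
    interval_cases g <;> rfl
  rw [hA, List.getElem_map, ← List.getD_eq_getElem _ [], hB, pvRows_eq_foldG]
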